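-- pv_equiv track=rewrite | github.com/jro44/777 | main_777v3.py | _chunk_tokens_to_draws
-- ===== SOURCE A (Python) =====
-- from typing import List, Dict, Tuple, Optional
--
-- NUM_MIN = 1
--
-- NUM_MAX = 49
--
-- PICK_COUNT = 6
--
-- def _chunk_tokens_to_draws(tokens: List[int]) -> List[List[int]]:
--     if len(tokens) < PICK_COUNT:
--         return []
--
--     if len(tokens) % PICK_COUNT == 0:
--         draws = []
--         for i in range(0, len(tokens), PICK_COUNT):
--             d = tokens[i:i + PICK_COUNT]
--             draws.append(sorted(d))
--         return draws
--
--     best = []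
--     best_valid = -1
--     for offset in range(PICK_COUNT):
--         t = tokens[offset:]
--         if len(t) < PICK_COUNT:
--             continue
--         cut = (len(t) // PICK_COUNT) * PICK_COUNT
--         t = t[:cut]
--         draws = []
--         valid = 0
--         for i in range(0, len(t), PICK_COUNT):
--             d = t[i:i + PICK_COUNT]
--             if len(set(d)) == PICK_COUNT and all(NUM_MIN <= n <= NUM_MAX for n in d):
--                 valid += 1
--             draws.append(sorted(d))
--         if valid > best_valid:
--             best_valid = valid
--             best = draws
--     return best
-- ===== SOURCE B (Python) =====
-- from typing import List
--
-- NUM_MIN = 1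
-- NUM_MAX = 49
-- PICK_COUNT = 6
--
--
-- def _chunk_tokens_to_draws(tokens: List[int]) -> List[List[int]]:
--     n = len(tokens)
--     if n < PICK_COUNT:
--         return []
--
--     if n % PICK_COUNT == 0:
--         return [sorted(tokens[i:i + PICK_COUNT])
--                 for i in range(0, n, PICK_COUNT)]
--
--     # One sliding pass over ALL window start positions, bucketing valid
--     # windows by start % 6: counts[o] is exactly the number of valid draws
--     # the chunking at offset o would produce.
--     counts = [0] * PICK_COUNT
--     for p in range(n - PICK_COUNT + 1):
--         d = tokens[p:p + PICK_COUNT]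
--         if len(set(d)) == PICK_COUNT and all(NUM_MIN <= x <= NUM_MAX for x in d):
--             counts[p % PICK_COUNT] += 1
--
--     off = counts.index(max(counts))  # first offset with the most valid draws
--     t = tokens[off:]
--     cut = (len(t) // PICK_COUNT) * PICK_COUNT
--     return [sorted(t[i:i + PICK_COUNT]) for i in range(0, cut, PICK_COUNT)]
-- ===== Notes on version B (the rewrite author's own statement) =====
-- stated objective: alternative
-- what changed: A runs six separate per-offset passes, each building its sorted chunk list and valid count and keeping the best-so-far list; B makes one sliding pass over all window start positions, bucketing valid windows by start mod 6 into a counts table, picks the winning offset with counts.index(max(counts)), and only then builds that offset's sorted chunks.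
import Mathlib
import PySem

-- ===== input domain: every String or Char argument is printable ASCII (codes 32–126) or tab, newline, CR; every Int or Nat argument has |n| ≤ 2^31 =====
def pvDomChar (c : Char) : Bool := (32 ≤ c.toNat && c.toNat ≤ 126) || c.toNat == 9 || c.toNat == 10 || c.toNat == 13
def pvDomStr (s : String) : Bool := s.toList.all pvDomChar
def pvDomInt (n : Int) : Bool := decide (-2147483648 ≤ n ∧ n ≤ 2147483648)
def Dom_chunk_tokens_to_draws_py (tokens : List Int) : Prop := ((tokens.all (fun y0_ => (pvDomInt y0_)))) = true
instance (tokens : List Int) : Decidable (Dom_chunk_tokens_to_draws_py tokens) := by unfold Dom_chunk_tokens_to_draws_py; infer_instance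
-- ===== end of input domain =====

-- B replaces A's six per-offset build-and-count passes by ONE sliding pass over all window start
-- positions, bucketing valid windows by start mod 6 (counts[o] = valid draws of offset o), then
-- counts.index(max(counts)) picks the winning offset (first wins, = A's strict-> tie-break) and a
-- single build pass materialises its sorted chunks; same return value.

-- shared helper: Python's `len(set(d)) == PICK_COUNT and all(NUM_MIN <= n <= NUM_MAX for n in d)`
def pvValid6 (d : List Int) : Bool :=
  ((PySem.Set.ofList d).length == 6) && d.all (fun n => decide (1 ≤ n) && decide (n ≤ 49))

-- ===== PORT A =====
def chunk_tokens_to_draws_py (tokens : List Int) : List (List Int) :=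
  if tokens.length < 6 then []
  else if PySem.Int.mod (tokens.length : Int) 6 == 0 then
    (PySem.List.pyRange 0 (tokens.length : Int) 6).foldl (fun draws i =>
      draws ++ [PySem.List.sorted (PySem.List.slice tokens (some i) (some (i + 6))) (fun x => x) false]) []
  else
    let r := (PySem.List.pyRange 0 6 1).foldl (fun (st : List (List Int) × Int) offset =>
      let t := PySem.List.slice tokens (some offset) none
      if t.length < 6 then st
      else
        let cut := PySem.Int.floordiv (t.length : Int) 6 * 6
        let t := PySem.List.slice t none (some cut)
        let dv := (PySem.List.pyRange 0 (t.length : Int) 6).foldl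
          (fun (dv : List (List Int) × Int) i =>
            (dv.1 ++ [PySem.List.sorted (PySem.List.slice t (some i) (some (i + 6))) (fun x => x) false],
             if pvValid6 (PySem.List.slice t (some i) (some (i + 6))) then dv.2 + 1 else dv.2)) ([], 0)
        if dv.2 > st.2 then (dv.1, dv.2) else st) ([], -1)
    r.1

-- ===== PORT B =====
def chunk_tokens_to_draws_py_alt (tokens : List Int) : List (List Int) :=
  if tokens.length < 6 then []
  else if PySem.Int.mod (tokens.length : Int) 6 == 0 then
    (PySem.List.pyRange 0 (tokens.length : Int) 6).map (fun i =>
      PySem.List.sorted (PySem.List.slice tokens (some i) (some (i + 6))) (fun x => x) false)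
  else
    -- one sliding pass: counts[p % 6] += 1 for each valid window tokens[p:p+6]
    -- (p ≥ 0 so 0 ≤ p % 6 < 6 = len(counts): the .toNat on the list-write index is exact)
    let counts := (PySem.List.pyRange 0 ((tokens.length : Int) - 6 + 1) 1).foldl
      (fun (cs : List Int) p =>
        if pvValid6 (PySem.List.slice tokens (some p) (some (p + 6))) then
          cs.set (PySem.Int.mod p 6).toNat (PySem.List.pyGetD cs (PySem.Int.mod p 6) 0 + 1)
        else cs)
      [0, 0, 0, 0, 0, 0]
    -- counts is nonempty, and max(counts) ∈ counts: neither max() nor .index() can raise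
    let m := (PySem.List.max? counts (fun x => x)).getD 0
    let off := (PySem.List.index? counts m).getD 0
    let t := PySem.List.slice tokens (some (off : Int)) none
    let cut := PySem.Int.floordiv (t.length : Int) 6 * 6
    (PySem.List.pyRange 0 cut 6).map (fun i =>
      PySem.List.sorted (PySem.List.slice t (some i) (some (i + 6))) (fun x => x) false)

-- ===== PRECONDITION & SPEC =====
def Spec_chunk_tokens_to_draws_py (tokens : List Int) (out : List (List Int)) : Prop := out = chunk_tokens_to_draws_py_alt tokens
instance (tokens : List Int) (out : List (List Int)) : Decidable (Spec_chunk_tokens_to_draws_py tokens out) := by unfold Spec_chunk_tokens_to_draws_py; infer_instance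

-- ===== CLAIM (what is proved, stated in full; the proofs are below) =====
def Claim_equal_chunk_tokens_to_draws_py : Prop := ∀ (tokens : List Int), Dom_chunk_tokens_to_draws_py tokens → Spec_chunk_tokens_to_draws_py tokens (chunk_tokens_to_draws_py tokens)

-- ===== LEMMAS AND PROOFS =====

-- the sorted 6-chunks of tokens[off:], truncated to a multiple of 6 (B's final build pass)
def pvBuild (tokens : List Int) (off : Int) : List (List Int) :=
  let t := PySem.List.slice tokens (some off) none
  let cut := PySem.Int.floordiv (t.length : Int) 6 * 6
  (PySem.List.pyRange 0 cut 6).map (fun i =>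
    PySem.List.sorted (PySem.List.slice t (some i) (some (i + 6))) (fun x => x) false)

-- window validity at start position p
def pvW (tokens : List Int) (p : Nat) : Bool :=
  pvValid6 (PySem.List.slice tokens (some (p : Int)) (some ((p : Int) + 6)))

-- number of valid draws of the chunking at offset o
def pvCnt (tokens : List Int) (o : Nat) : Nat :=
  (List.range ((tokens.length - o) / 6)).countP (fun k => pvW tokens (o + 6 * k))

-- A's inner per-offset fold appends the sorted chunks and separately accumulates the valid count
theorem pvInnerFold (t : List Int) (l : List Int) (ds : List (List Int)) (v : Int) :
    l.foldl (fun (dv : List (List Int) × Int) i =>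
      (dv.1 ++ [PySem.List.sorted (PySem.List.slice t (some i) (some (i + 6))) (fun x => x) false],
       if pvValid6 (PySem.List.slice t (some i) (some (i + 6))) then dv.2 + 1 else dv.2)) (ds, v)
    = (ds ++ l.map (fun i => PySem.List.sorted (PySem.List.slice t (some i) (some (i + 6))) (fun x => x) false),
       l.foldl (fun vv i => if pvValid6 (PySem.List.slice t (some i) (some (i + 6))) then vv + 1 else vv) v) := by
  induction l generalizing ds v with
  | nil => simp
  | cons a l ih => simp [List.foldl_cons, ih]

-- a 6-chunk of the cut-truncated list is the same chunk of the untruncated list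
theorem pvSliceTake (t : List Int) (c : Nat) (i : Int) (h0 : 0 ≤ i) (h6 : i + 6 ≤ (c : Int)) :
    PySem.List.slice (t.take c) (some i) (some (i + 6)) = PySem.List.slice t (some i) (some (i + 6)) := by
  rw [PySem.List.slice_toNat _ h0 (by omega), PySem.List.slice_toNat _ h0 (by omega),
    List.drop_take, List.take_take]
  congr 1; omega

theorem pvMemRange (c : Nat) (hc : 6 ∣ c) (i : Int) (hi : i ∈ PySem.List.pyRange 0 (c : Int) 6) :
    0 ≤ i ∧ i + 6 ≤ (c : Int) := by
  rw [PySem.List.mem_pyRange_iff_of_pos (by norm_num)] at hi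
  obtain ⟨h0, hlt, k, hk⟩ := hi
  obtain ⟨m, hm⟩ := hc
  omega

-- at one offset, A's draws-and-count fold returns the build pass paired with the raw count fold
theorem pvOffset (tokens : List Int) (offset : Int) :
    ((PySem.List.pyRange 0
        (((PySem.List.slice (PySem.List.slice tokens (some offset) none) none
            (some (PySem.Int.floordiv ((PySem.List.slice tokens (some offset) none).length : Int) 6 * 6))).length : Int)) 6).foldl
        (fun (dv : List (List Int) × Int) i =>
          (dv.1 ++ [PySem.List.sorted (PySem.List.slice (PySem.List.slice (PySem.List.slice tokens (some offset) none) none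
            (some (PySem.Int.floordiv ((PySem.List.slice tokens (some offset) none).length : Int) 6 * 6))) (some i) (some (i + 6))) (fun x => x) false],
           if pvValid6 (PySem.List.slice (PySem.List.slice (PySem.List.slice tokens (some offset) none) none
            (some (PySem.Int.floordiv ((PySem.List.slice tokens (some offset) none).length : Int) 6 * 6))) (some i) (some (i + 6))) then dv.2 + 1 else dv.2)) ([], 0))
    = (pvBuild tokens offset,
       (PySem.List.pyRange 0 (PySem.Int.floordiv ((PySem.List.slice tokens (some offset) none).length : Int) 6 * 6) 6).foldl
         (fun v i => if pvValid6 (PySem.List.slice (PySem.List.slice tokens (some offset) none) (some i) (some (i + 6))) then v + 1 else v) 0) := by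
  set t := PySem.List.slice tokens (some offset) none with ht
  have hc : PySem.Int.floordiv (t.length : Int) 6 * 6 = ((t.length / 6 * 6 : Nat) : Int) := by
    rw [show ((6:Int)) = ((6:Nat):Int) by norm_num, PySem.Int.floordiv_natCast]
    push_cast; ring
  set c : Nat := t.length / 6 * 6 with hcdef
  have hcle : c ≤ t.length := Nat.div_mul_le_self _ _
  have ht' : PySem.List.slice t none (some (PySem.Int.floordiv (t.length : Int) 6 * 6)) = t.take c := by
    rw [hc, PySem.List.slice_to_natCast]
  have hlen : (t.take c).length = c := by simp [hcle]
  rw [ht', hlen, pvInnerFold]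
  have hcongr : ∀ i ∈ PySem.List.pyRange 0 (c : Int) 6,
      PySem.List.slice (t.take c) (some i) (some (i + 6)) = PySem.List.slice t (some i) (some (i + 6)) := by
    intro i hi
    obtain ⟨h0, hle⟩ := pvMemRange c ⟨t.length / 6, by omega⟩ i hi
    exact pvSliceTake t c i h0 hle
  rw [Prod.mk.injEq]
  refine ⟨?_, ?_⟩
  · show [] ++ _ = pvBuild tokens offset
    rw [List.nil_append, pvBuild]
    simp only [← ht, hc]
    exact List.map_congr_left (fun i hi => by rw [hcongr i hi])
  · rw [hc]
    exact PySem.List.foldl_congr_mem _ _ _ _ (fun acc i hi => by rw [hcongr i hi])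

-- a window of tokens[a:] is the shifted window of tokens
theorem pvWindowShift (xs : List Int) (a b : Nat) :
    PySem.List.slice (xs.drop a) (some (b : Int)) (some ((b : Int) + 6))
    = PySem.List.slice xs (some ((a + b : Nat) : Int)) (some (((a + b : Nat) : Int) + 6)) := by
  rw [PySem.List.slice_toNat _ (by positivity) (by positivity),
      PySem.List.slice_toNat _ (by positivity) (by positivity), List.drop_drop]
  have h1 : ((b : Int)).toNat = b := by omega
  have h2 : ((b : Int) + 6).toNat = b + 6 := by omega
  have h3 : (((a + b : Nat) : Int)).toNat = a + b := by omega
  have h4 : (((a + b : Nat) : Int) + 6).toNat = a + b + 6 := by omega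
  rw [h1, h2, h3, h4]
  congr 1 <;> omega

-- A's raw count fold at offset o equals pvCnt
theorem pvAcount (tokens : List Int) (o : Nat) :
    (PySem.List.pyRange 0 (PySem.Int.floordiv (((tokens.drop o).length : Int)) 6 * 6) 6).foldl
      (fun v i => if pvValid6 (PySem.List.slice (tokens.drop o) (some i) (some (i + 6))) then v + 1 else v) (0 : Int)
    = (pvCnt tokens o : Int) := by
  have hc : PySem.Int.floordiv (((tokens.drop o).length : Int)) 6 * 6
      = (((tokens.length - o) / 6 * 6 : Nat) : Int) := by
    rw [show ((6:Int)) = ((6:Nat):Int) by norm_num, PySem.Int.floordiv_natCast]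
    push_cast [List.length_drop]; ring
  set K : Nat := (tokens.length - o) / 6 with hKdef
  have hr : PySem.List.pyRange 0 ((K * 6 : Nat) : Int) 6
      = (List.range K).map (fun k => ((6 * k : Nat) : Int)) := by
    rw [PySem.List.pyRange_of_pos 0 _ (by norm_num)]
    rcases Nat.eq_zero_or_pos K with h0 | hpos
    · simp [h0]
    · rw [if_pos (by push_cast; omega)]
      have : ((((K * 6 : Nat) : Int) - 0 + 6 - 1) / 6).toNat = K := by omega
      rw [this]
      apply List.map_congr_left
      intro k hk
      push_cast; ring
  rw [hc, hr, List.foldl_map, PySem.List.foldl_count_if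
    (fun k : Nat => pvValid6 (PySem.List.slice (tokens.drop o) (some ((6 * k : Nat) : Int)) (some (((6 * k : Nat) : Int) + 6))))]
  rw [zero_add, pvCnt, ← hKdef, Nat.cast_inj]
  apply List.countP_congr
  intro k hk
  rw [pvW, ← pvWindowShift tokens o (6 * k)]

-- B's bucket count at offset o < 6 equals pvCnt: p ↦ (p-o)/6 is a bijection between the
-- valid window starts ≡ o (mod 6) and the chunk indices of offset o
theorem pvBij (v : Nat → Bool) (o K N : Nat) (ho : o < 6) (hK : ∀ k, k < K ↔ o + 6 * k < N) :
    (List.range N).countP (fun p => (p % 6 == o) && v p) = (List.range K).countP (fun k => v (o + 6 * k)) := by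
  rw [List.countP_eq_length_filter, List.countP_eq_length_filter]
  rw [← List.toFinset_card_of_nodup (List.Nodup.filter _ (List.nodup_range)),
      ← List.toFinset_card_of_nodup (List.Nodup.filter _ (List.nodup_range))]
  apply Finset.card_bij' (fun p _ => (p - o) / 6) (fun k _ => o + 6 * k)
  · intro p hp
    simp only [List.mem_toFinset, List.mem_filter, List.mem_range, Bool.and_eq_true, beq_iff_eq] at hp ⊢
    obtain ⟨hpN, hmod, hv⟩ := hp
    have hpe : o + 6 * ((p - o) / 6) = p := by omega
    exact ⟨(hK _).mpr (by omega), by rw [hpe]; exact hv⟩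
  · intro k hk
    simp only [List.mem_toFinset, List.mem_filter, List.mem_range, Bool.and_eq_true, beq_iff_eq] at hk ⊢
    exact ⟨(hK k).mp hk.1, by omega, hk.2⟩
  · intro p hp
    simp only [List.mem_toFinset, List.mem_filter, List.mem_range, Bool.and_eq_true, beq_iff_eq] at hp
    omega
  · intro k hk
    omega

-- the counts-table fold: entry j accumulates the valid windows with start ≡ j (mod 6)
theorem pvCountsFold (tokens : List Int) (L : List Int) (hL : ∀ p ∈ L, 0 ≤ p)
    (cs : List Int) (h6 : cs.length = 6) (j : Nat) (hj : j < 6) :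
    ((L.foldl (fun (cs : List Int) p =>
        if pvValid6 (PySem.List.slice tokens (some p) (some (p + 6))) then
          cs.set (PySem.Int.mod p 6).toNat (PySem.List.pyGetD cs (PySem.Int.mod p 6) 0 + 1)
        else cs) cs).getD j 0)
    = cs.getD j 0 + ((L.countP (fun p => (PySem.Int.mod p 6 == (j : Int)) && pvValid6 (PySem.List.slice tokens (some p) (some (p + 6))))) : Int) := by
  induction L generalizing cs with
  | nil => simp
  | cons p L ih =>
    have hp : 0 ≤ p := hL p List.mem_cons_self
    have hL' : ∀ q ∈ L, 0 ≤ q := fun q hq => hL q (List.mem_cons_of_mem _ hq)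
    have hm0 : 0 ≤ PySem.Int.mod p 6 := PySem.Int.mod_nonneg p (by norm_num)
    have hm6 : PySem.Int.mod p 6 < 6 := PySem.Int.mod_lt p (by norm_num)
    set i : Nat := (PySem.Int.mod p 6).toNat with hidef
    have hi6 : i < 6 := by omega
    have hmi : PySem.Int.mod p 6 = (i : Int) := by omega
    simp only [List.foldl_cons, List.countP_cons]
    by_cases hv : pvValid6 (PySem.List.slice tokens (some p) (some (p + 6))) = true
    · rw [if_pos hv]
      rw [ih hL' _ (by rw [List.length_set]; exact h6)]
      have hread : PySem.List.pyGetD cs (PySem.Int.mod p 6) 0 = cs.getD i 0 := by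
        rw [PySem.List.pyGetD_of_nonneg cs 0 hm0]
      have hset : (cs.set i (cs.getD i 0 + 1)).getD j 0
          = if i = j then cs.getD i 0 + 1 else cs.getD j 0 := by
        by_cases hij : i = j
        · subst hij
          rw [if_pos rfl, List.getD_eq_getElem?_getD, List.getElem?_set_self (by omega),
            Option.getD_some]
        · rw [if_neg hij, List.getD_eq_getElem?_getD, List.getElem?_set_ne hij,
            ← List.getD_eq_getElem?_getD]
      have hcond : ((PySem.Int.mod p 6 == (j : Int)) && true) = (i == j) := by
        rw [hmi]; simp
      rw [hread, hset, hv, hcond]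
      by_cases hij : i = j
      · subst hij; simp; ring
      · rw [if_neg hij, if_neg (by simpa using hij)]
        push_cast; ring
    · rw [if_neg hv]
      rw [ih hL' _ h6]
      have : ((PySem.Int.mod p 6 == (j : Int)) && pvValid6 (PySem.List.slice tokens (some p) (some (p + 6)))) = false := by
        rw [Bool.not_eq_true] at hv
        rw [hv, Bool.and_false]
      rw [this]
      simp

theorem pvCountsLen (tokens : List Int) (L : List Int) (cs : List Int) :
    (L.foldl (fun (cs : List Int) p =>
        if pvValid6 (PySem.List.slice tokens (some p) (some (p + 6))) then
          cs.set (PySem.Int.mod p 6).toNat (PySem.List.pyGetD cs (PySem.Int.mod p 6) 0 + 1)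
        else cs) cs).length = cs.length := by
  induction L generalizing cs with
  | nil => rfl
  | cons p L ih => simp only [List.foldl_cons]; split <;> rw [ih] <;> simp

-- all but the max are below it, so the strict-improvement fold keeps its state
theorem pvFoldKeep {α : Type} (ps : List (Int × Nat)) (g : Nat → α) (st : α × Int)
    (hall : ∀ p ∈ ps, p.1 ≤ st.2) :
    ps.foldl (fun (st : α × Int) p => if p.1 > st.2 then (g p.2, p.1) else st) st = st := by
  induction ps with
  | nil => rfl
  | cons p ps ih =>
    simp only [List.foldl_cons]
    rw [if_neg (by simp only [gt_iff_lt, not_lt]; exact hall p (List.mem_cons_self))]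
    exact ih (fun q hq => hall q (List.mem_cons_of_mem _ hq))

theorem pvFoldlMaxEq (cs : List Int) (b : Int) (hall : ∀ c ∈ cs, c ≤ b) :
    cs.foldl max b = b := by
  rcases PySem.List.foldl_max_mem cs b with h | h
  · exact h
  · exact le_antisymm (hall _ h) (PySem.List.le_foldl_max cs b).1

-- the strict-improvement fold over (value, index) pairs returns the first maximum and its index
theorem pvArgmax {α : Type} (cs : List Int) (s : Nat) (bA : α) (bV : Int) (g : Nat → α)
    (hex : ∃ c ∈ cs, bV < c) :
    (cs.zipIdx s).foldl (fun (st : α × Int) p => if p.1 > st.2 then (g p.2, p.1) else st) (bA, bV)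
    = (g (s + (PySem.List.index? cs (cs.foldl max bV)).getD 0), cs.foldl max bV) := by
  induction cs generalizing s bA bV with
  | nil => obtain ⟨c, hc, _⟩ := hex; exact absurd hc (List.not_mem_nil)
  | cons c t ih =>
    simp only [List.zipIdx_cons, List.foldl_cons]
    by_cases hcb : c > bV
    · rw [if_pos hcb]
      have hmaxc : max bV c = c := max_eq_right (le_of_lt hcb)
      by_cases hex2 : ∃ d ∈ t, c < d
      · rw [ih (s + 1) (g s) c hex2, hmaxc]
        have hgt : c < t.foldl max c := by
          obtain ⟨d, hd, hcd⟩ := hex2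
          exact lt_of_lt_of_le hcd ((PySem.List.le_foldl_max t c).2 d hd)
        have hne : c ≠ t.foldl max c := ne_of_lt hgt
        have hmem : t.foldl max c ∈ t := by
          rcases PySem.List.foldl_max_mem t c with h | h
          · exact absurd h.symm (by omega)
          · exact h
        rw [PySem.List.index?_cons_of_ne t hne]
        obtain ⟨k, hk⟩ := Option.isSome_iff_exists.mp ((PySem.List.index?_isSome_iff _ _).mpr hmem)
        rw [hk]
        simp only [Option.map_some, Option.getD_some]
        rw [Prod.mk.injEq]
        exact ⟨congrArg g (by omega), rfl⟩
      · push_neg at hex2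
        rw [pvFoldKeep _ _ _ (by
          intro q hq
          have hm := List.mem_zipIdx hq
          have hq1 : q.1 ∈ t := hm.2.2 ▸ List.getElem_mem _
          exact hex2 q.1 hq1), hmaxc, pvFoldlMaxEq t c hex2, PySem.List.index?_cons_self]
        simp
    · rw [if_neg hcb]
      push_neg at hcb
      have hex2 : ∃ d ∈ t, bV < d := by
        obtain ⟨d, hd, hbd⟩ := hex
        rcases List.mem_cons.mp hd with rfl | hdt
        · omega
        · exact ⟨d, hdt, hbd⟩
      rw [ih (s + 1) bA bV hex2, max_eq_left hcb]
      have hgt : bV < t.foldl max bV := by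
        obtain ⟨d, hd, hbd⟩ := hex2
        exact lt_of_lt_of_le hbd ((PySem.List.le_foldl_max t bV).2 d hd)
      have hne : c ≠ t.foldl max bV := by omega
      have hmem : t.foldl max bV ∈ t := by
        rcases PySem.List.foldl_max_mem t bV with h | h
        · omega
        · exact h
      rw [PySem.List.index?_cons_of_ne t hne]
      obtain ⟨k, hk⟩ := Option.isSome_iff_exists.mp ((PySem.List.index?_isSome_iff _ _).mpr hmem)
      rw [hk]
      simp only [Option.map_some, Option.getD_some]
      rw [Prod.mk.injEq]
      exact ⟨congrArg g (by omega), rfl⟩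


-- A's per-offset pass, rewritten: skip short tails, else compare pvCnt and keep the build
theorem pvCongrStep (tokens : List Int) (l : List Int) (hl : ∀ o ∈ l, 0 ≤ o)
    (st : List (List Int) × Int) :
    l.foldl (fun (st : List (List Int) × Int) offset =>
      let t := PySem.List.slice tokens (some offset) none
      if t.length < 6 then st
      else
        let cut := PySem.Int.floordiv (t.length : Int) 6 * 6
        let t := PySem.List.slice t none (some cut)
        let dv := (PySem.List.pyRange 0 (t.length : Int) 6).foldl
          (fun (dv : List (List Int) × Int) i =>
            (dv.1 ++ [PySem.List.sorted (PySem.List.slice t (some i) (some (i + 6))) (fun x => x) false],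
             if pvValid6 (PySem.List.slice t (some i) (some (i + 6))) then dv.2 + 1 else dv.2)) ([], 0)
        if dv.2 > st.2 then (dv.1, dv.2) else st) st
    = l.foldl (fun (st : List (List Int) × Int) o =>
        if (tokens.drop o.toNat).length < 6 then st
        else if ((pvCnt tokens o.toNat : Int)) > st.2 then (pvBuild tokens o, (pvCnt tokens o.toNat : Int)) else st) st := by
  apply PySem.List.foldl_congr_mem
  intro acc o ho
  have h0 : 0 ≤ o := hl o ho
  have hsl : PySem.List.slice tokens (some o) none = tokens.drop o.toNat :=
    PySem.List.slice_from tokens h0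
  dsimp only
  rw [pvOffset tokens o, hsl, pvAcount tokens o.toNat]

-- a skipped offset has no chunks, so with a nonnegative best count the skip guard is redundant
theorem pvSkipElim (tokens : List Int) (l : List Int) (st : List (List Int) × Int) (hst : 0 ≤ st.2) :
    l.foldl (fun (st : List (List Int) × Int) o =>
        if (tokens.drop o.toNat).length < 6 then st
        else if ((pvCnt tokens o.toNat : Int)) > st.2 then (pvBuild tokens o, (pvCnt tokens o.toNat : Int)) else st) st
    = l.foldl (fun (st : List (List Int) × Int) o =>
        if ((pvCnt tokens o.toNat : Int)) > st.2 then (pvBuild tokens o, (pvCnt tokens o.toNat : Int)) else st) st := by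
  induction l generalizing st with
  | nil => rfl
  | cons o l ih =>
    simp only [List.foldl_cons]
    by_cases hlen : (tokens.drop o.toNat).length < 6
    · rw [if_pos hlen]
      have hz : pvCnt tokens o.toNat = 0 := by
        rw [pvCnt]
        have h0 : (tokens.length - o.toNat) / 6 = 0 := by
          rw [List.length_drop] at hlen; omega
        rw [h0]; rfl
      rw [if_neg (by rw [hz]; omega)]
      exact ih st hst
    · rw [if_neg hlen]
      by_cases hgt : ((pvCnt tokens o.toNat : Int)) > st.2
      · rw [if_pos hgt]
        exact ih _ (by dsimp only; omega)
      · rw [if_neg hgt]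
        exact ih st hst


-- ===== VERDICT (by name: the statement is the Claim_ definition above) =====
theorem chunk_tokens_to_draws_py_spec : Claim_equal_chunk_tokens_to_draws_py := by
  intro tokens _
  unfold Spec_chunk_tokens_to_draws_py chunk_tokens_to_draws_py
  by_cases ha : tokens.length < 6
  · simp only [ha, if_pos]
    unfold chunk_tokens_to_draws_py_alt
    rw [if_pos ha]
  · simp only [ha, if_false]
    by_cases hb : (PySem.Int.mod (tokens.length : Int) 6 == 0) = true
    · simp only [hb, if_pos]
      rw [PySem.List.foldl_append_singleton_eq_map]
      unfold chunk_tokens_to_draws_py_alt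
      rw [if_neg ha, if_pos hb]
      simp
    · simp only [hb, Bool.false_eq_true, if_false]
      have h6 : 6 ≤ tokens.length := by omega
      have hLpos : ∀ p ∈ PySem.List.pyRange 0 ((tokens.length : Int) - 6 + 1) 1, 0 ≤ p := by
        intro p hp; rw [PySem.List.mem_pyRange_one] at hp; exact hp.1
      have hcnt : ∀ j : Nat, j < 6 →
          ((PySem.List.pyRange 0 ((tokens.length : Int) - 6 + 1) 1).countP
            (fun p => (PySem.Int.mod p 6 == (j : Int)) && pvValid6 (PySem.List.slice tokens (some p) (some (p + 6))))) = pvCnt tokens j := by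
        intro j hj
        rw [show ((tokens.length : Int) - 6 + 1) = (((tokens.length - 5 : Nat)) : Int) by omega,
          PySem.List.pyRange_one, List.countP_map,
          show ((((tokens.length - 5 : Nat)) : Int) - 0).toNat = tokens.length - 5 by omega,
          show pvCnt tokens j = (List.range ((tokens.length - j) / 6)).countP (fun k => pvW tokens (j + 6 * k)) from rfl,
          ← pvBij (pvW tokens) j ((tokens.length - j) / 6) (tokens.length - 5) hj (by omega)]
        apply List.countP_congr
        intro k hk
        simp only [Function.comp_apply, zero_add]
        rw [show PySem.Int.mod ((k : Nat) : Int) 6 = (((k % 6 : Nat)) : Int) from by exact_mod_cast PySem.Int.mod_natCast k 6]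
        have hbeq : ((((k % 6 : Nat)) : Int) == ((j : Nat) : Int)) = ((k % 6) == j) := by
          rw [Bool.eq_iff_iff]
          simp only [beq_iff_eq]
          exact ⟨fun h => by exact_mod_cast h, fun h => by exact_mod_cast h⟩
        rw [hbeq, pvW]
      have hcounts : (PySem.List.pyRange 0 ((tokens.length : Int) - 6 + 1) 1).foldl
          (fun (cs : List Int) p =>
            if pvValid6 (PySem.List.slice tokens (some p) (some (p + 6))) then
              cs.set (PySem.Int.mod p 6).toNat (PySem.List.pyGetD cs (PySem.Int.mod p 6) 0 + 1)
            else cs) [0, 0, 0, 0, 0, 0] = [(pvCnt tokens 0 : Int), (pvCnt tokens 1 : Int), (pvCnt tokens 2 : Int), (pvCnt tokens 3 : Int), (pvCnt tokens 4 : Int), (pvCnt tokens 5 : Int)] := by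
        apply List.ext_getElem
        · rw [pvCountsLen]; rfl
        · intro idx h1 h2
          have hidx : idx < 6 := by rw [pvCountsLen] at h1; simpa using h1
          rw [← List.getD_eq_getElem _ 0 h1, ← List.getD_eq_getElem _ 0 h2,
            pvCountsFold tokens _ hLpos _ rfl idx hidx, hcnt idx hidx]
          interval_cases idx <;> simp
      have hBval : chunk_tokens_to_draws_py_alt tokens
          = pvBuild tokens (((PySem.List.index? [(pvCnt tokens 0 : Int), (pvCnt tokens 1 : Int), (pvCnt tokens 2 : Int), (pvCnt tokens 3 : Int), (pvCnt tokens 4 : Int), (pvCnt tokens 5 : Int)]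
              ((PySem.List.max? [(pvCnt tokens 0 : Int), (pvCnt tokens 1 : Int), (pvCnt tokens 2 : Int), (pvCnt tokens 3 : Int), (pvCnt tokens 4 : Int), (pvCnt tokens 5 : Int)] (fun x => x)).getD 0)).getD 0 : Nat) : Int) := by
        unfold chunk_tokens_to_draws_py_alt
        rw [if_neg ha, if_neg hb]
        rw [hcounts]
        rfl
      rw [hBval]
      rw [pvCongrStep tokens _ (fun o ho => ((PySem.List.mem_pyRange_one).mp ho).1) _]
      rw [show PySem.List.pyRange 0 6 1 = ((0 : Int) :: [1, 2, 3, 4, 5]) from by decide,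
        List.foldl_cons]
      rw [if_neg (show ¬ (tokens.drop ((0 : Int)).toNat).length < 6 from by simpa using ha)]
      rw [if_pos (show ((pvCnt tokens ((0 : Int)).toNat : Int)) > (([] : List (List Int)), (-1 : Int)).2 from by dsimp only; omega)]
      rw [pvSkipElim tokens [1, 2, 3, 4, 5] _ (by dsimp only; omega)]
      have hzip : ([1, 2, 3, 4, 5] : List Int).foldl
            (fun (st : List (List Int) × Int) o =>
              if ((pvCnt tokens o.toNat : Int)) > st.2 then (pvBuild tokens o, (pvCnt tokens o.toNat : Int)) else st)
            (pvBuild tokens 0, (pvCnt tokens ((0 : Int)).toNat : Int))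
          = (([(pvCnt tokens 0 : Int), (pvCnt tokens 1 : Int), (pvCnt tokens 2 : Int), (pvCnt tokens 3 : Int), (pvCnt tokens 4 : Int), (pvCnt tokens 5 : Int)]).zipIdx 0).foldl
              (fun (st : List (List Int) × Int) p => if p.1 > st.2 then ((fun j : Nat => pvBuild tokens (j : Int)) p.2, p.1) else st)
              ([], -1) := by
        simp only [List.zipIdx_cons, List.zipIdx_nil, List.foldl_cons, List.foldl_nil]
        rw [if_pos (show (((pvCnt tokens 0 : Int), (0 : Nat)) : Int × Nat).1 > ((([] : List (List Int)), (-1 : Int)) : List (List Int) × Int).2 from by dsimp only; omega)]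
        rfl
      rw [hzip, pvArgmax ([(pvCnt tokens 0 : Int), (pvCnt tokens 1 : Int), (pvCnt tokens 2 : Int), (pvCnt tokens 3 : Int), (pvCnt tokens 4 : Int), (pvCnt tokens 5 : Int)]) 0 [] (-1) (fun j : Nat => pvBuild tokens (j : Int))
        ⟨(pvCnt tokens 0 : Int), List.mem_cons_self, by omega⟩]
      have hM : (([(pvCnt tokens 0 : Int), (pvCnt tokens 1 : Int), (pvCnt tokens 2 : Int), (pvCnt tokens 3 : Int), (pvCnt tokens 4 : Int), (pvCnt tokens 5 : Int)]).foldl max (-1))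
          = (PySem.List.max? [(pvCnt tokens 0 : Int), (pvCnt tokens 1 : Int), (pvCnt tokens 2 : Int), (pvCnt tokens 3 : Int), (pvCnt tokens 4 : Int), (pvCnt tokens 5 : Int)] (fun x => x)).getD 0 := by
        rw [PySem.List.max?_id_cons, Option.getD_some]
        simp only [List.foldl_cons]
        rw [max_eq_right (show (-1 : Int) ≤ (pvCnt tokens 0 : Int) by omega)]
      rw [hM]
      simp
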